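-- pv_equiv track=rewrite | github.com/Shumy52/ai-institute-site | research-paper-graph/author_harvester.py | inverted_to_text
-- ===== SOURCE A (Python) =====
-- def inverted_to_text(inverted):
--     """Convert OpenAlex's inverted-index abstracts into normal text."""
--     if not inverted:
--         return None
--
--     words = []
--     for word, positions in inverted.items():
--         for pos in positions:
--             # Extend list if needed
--             if len(words) <= pos:
--                 words.extend([None] * (pos - len(words) + 1))
--             words[pos] = word
--
--     return " ".join(w for w in words if w)
-- ===== SOURCE B (Python) =====
-- def inverted_to_text(inverted):
--     """Convert OpenAlex's inverted-index abstracts into normal text."""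
--     if not inverted:
--         return None
--
--     pos2word = {}
--     for word, positions in inverted.items():
--         for pos in positions:
--             pos2word[pos] = word
--
--     return " ".join(
--         word for pos, word in sorted(pos2word.items(), key=lambda kv: kv[0]) if word
--     )
-- ===== Notes on version B (the rewrite author's own statement) =====
-- stated objective: alternative
-- what changed: B replaces A's dense grow-and-scatter word list (padding with None, in-place writes, then filtering the gaps) with a sparse position-to-word dict built in one pass and read out by sorting its keys.
-- outside the precondition, e.g. on inverted_to_text({'a': [0], 'b': [-1]}): A returns 'b', B returns 'b a'; on inverted_to_text({'w': [-1]}): A raises IndexError, B returns 'w'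
import Mathlib
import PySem

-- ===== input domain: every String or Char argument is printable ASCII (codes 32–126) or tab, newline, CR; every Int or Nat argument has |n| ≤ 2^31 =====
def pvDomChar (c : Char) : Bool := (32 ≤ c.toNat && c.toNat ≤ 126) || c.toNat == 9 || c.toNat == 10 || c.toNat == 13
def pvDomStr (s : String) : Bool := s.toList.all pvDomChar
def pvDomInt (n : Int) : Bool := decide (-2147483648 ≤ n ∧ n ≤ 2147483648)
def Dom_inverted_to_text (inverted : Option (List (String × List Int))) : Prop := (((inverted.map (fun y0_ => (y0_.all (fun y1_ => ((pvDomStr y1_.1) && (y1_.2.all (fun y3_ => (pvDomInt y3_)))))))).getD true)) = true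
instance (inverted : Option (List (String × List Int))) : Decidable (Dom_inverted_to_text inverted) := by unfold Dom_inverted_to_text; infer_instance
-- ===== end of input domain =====

-- B rebuilds the text from a sparse position→word dict sorted by key instead of A's dense
-- grow-and-scatter list (objective: alternative; equal output on Pre_, see Claim below).

-- ===== PORT A =====
-- the body of A's inner loop: extend words with None padding if needed, then 'words[pos] = word'.
-- A negative pos wraps as in Python; an index still out of range is a Python IndexError
-- (excluded by Pre_), modeled here as leaving the list unchanged.
def pvScatter (ws : List (Option String)) (pos : Int) (w : String) : List (Option String) :=
  let ws' := if (ws.length : Int) ≤ pos then ws ++ List.replicate (pos - (ws.length : Int) + 1).toNat none else ws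
  let i : Int := if pos < 0 then (ws'.length : Int) + pos else pos
  if 0 ≤ i ∧ i < (ws'.length : Int) then ws'.set i.toNat (some w) else ws'

def inverted_to_text (inverted : Option (List (String × List Int))) : Option String :=
  match inverted with
  | none => none
  | some l =>
    if l.isEmpty then none
    else
      let words := l.foldl (fun ws wp => wp.2.foldl (fun ws pos => pvScatter ws pos wp.1) ws) []
      some (PySem.Str.join " " ((words.filterMap id).filter (fun w => w != "")))

-- ===== PORT B =====
def inverted_to_text_alt (inverted : Option (List (String × List Int))) : Option String :=
  match inverted with
  | none => none
  | some l =>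
    if l.isEmpty then none
    else
      let pos2word : PySem.Dict Int String :=
        l.foldl (fun d wp => wp.2.foldl (fun d pos => d.insert pos wp.1) d) PySem.Dict.empty
      some (PySem.Str.join " "
        (((PySem.List.sorted pos2word.items (fun kv => kv.1)).map (fun kv => kv.2)).filter
          (fun w => w != "")))

-- ===== PRECONDITION & SPEC =====
-- Pre_ excludes (a) association lists with duplicate word keys, an artefact of encoding the Python
-- dict argument (a dict cannot hold duplicate keys), and (b) negative positions, meaningless for an
-- inverted index, on which A either raises IndexError or writes through Python's negative-index
-- wraparound into an accidental slot.
def Pre_inverted_to_text (inverted : Option (List (String × List Int))) : Prop :=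
  ((inverted.getD []).map Prod.fst).Nodup ∧
    ∀ wp ∈ inverted.getD [], ∀ p ∈ wp.2, 0 ≤ p
instance (inverted : Option (List (String × List Int))) : Decidable (Pre_inverted_to_text inverted) := by
  unfold Pre_inverted_to_text; infer_instance

def pvWitness_inverted_to_text : (Option (List (String × List Int))) :=
  (some [("hello", [0, 2]), ("world", [1])])

def Spec_inverted_to_text (inverted : Option (List (String × List Int))) (out : Option String) : Prop := out = inverted_to_text_alt inverted
instance (inverted : Option (List (String × List Int))) (out : Option String) : Decidable (Spec_inverted_to_text inverted out) := by unfold Spec_inverted_to_text; infer_instance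

-- ===== CLAIM (what is proved, stated in full; the proofs are below) =====
def Claim_equal_inverted_to_text : Prop := ∀ (inverted : Option (List (String × List Int))), Dom_inverted_to_text inverted → Pre_inverted_to_text inverted → Spec_inverted_to_text inverted (inverted_to_text inverted)

-- ===== LEMMAS AND PROOFS =====

-- the (position, word) assignments both loops perform, in order
def pvPairs (l : List (String × List Int)) : List (Int × String) :=
  l.flatMap (fun wp => wp.2.map (fun p => (p, wp.1)))

-- reading A's dense list at an arbitrary integer position
def pvLk (ws : List (Option String)) (k : Int) : Option String :=
  if k < 0 then none else ws.getD k.toNat none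

theorem pvFoldA_pairs (l : List (String × List Int)) (ws : List (Option String)) :
    l.foldl (fun ws wp => wp.2.foldl (fun ws pos => pvScatter ws pos wp.1) ws) ws
      = (pvPairs l).foldl (fun ws pw => pvScatter ws pw.1 pw.2) ws := by
  induction l generalizing ws with
  | nil => simp [pvPairs]
  | cons wp t ih =>
    simp only [List.foldl_cons, pvPairs, List.flatMap_cons, List.foldl_append, List.foldl_map]
    exact ih _

theorem pvFoldB_pairs (l : List (String × List Int)) (d : PySem.Dict Int String) :
    l.foldl (fun d wp => wp.2.foldl (fun d pos => d.insert pos wp.1) d) d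
      = (pvPairs l).foldl (fun d pw => d.insert pw.1 pw.2) d := by
  induction l generalizing d with
  | nil => simp [pvPairs]
  | cons wp t ih =>
    simp only [List.foldl_cons, pvPairs, List.flatMap_cons, List.foldl_append, List.foldl_map]
    exact ih _

theorem pvScatter_lk (ws : List (Option String)) (pos : Int) (w : String) (hpos : 0 ≤ pos)
    (k : Int) : pvLk (pvScatter ws pos w) k = if k = pos then some w else pvLk ws k := by
  unfold pvScatter pvLk
  by_cases hk : k < 0
  · simp only [if_pos hk]
    have : ¬ k = pos := by omega
    simp [this]
  · simp only [if_neg hk]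
    by_cases hext : (ws.length : Int) ≤ pos
    · simp only [if_pos hext, if_neg (by omega : ¬ pos < 0)]
      have hlen : ((ws ++ List.replicate (pos - (ws.length : Int) + 1).toNat none).length : Int)
          = pos + 1 := by
        simp [List.length_append, List.length_replicate]; omega
      rw [if_pos (by constructor <;> omega)]
      simp only [List.getD_eq_getElem?_getD, List.getElem?_set, List.getElem?_append,
        List.getElem?_replicate, List.length_append, List.length_replicate]
      split_ifs <;> simp_all <;> omega
    · simp only [if_neg hext, if_neg (by omega : ¬ pos < 0)]
      rw [if_pos (by constructor <;> omega)]
      simp only [List.getD_eq_getElem?_getD, List.getElem?_set]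
      split_ifs <;> simp_all <;> omega

theorem pvInvariant (ps : List (Int × String)) (ws : List (Option String))
    (d : PySem.Dict Int String) (hpos : ∀ p ∈ ps, 0 ≤ p.1)
    (h : ∀ k, pvLk ws k = d.get? k) :
    ∀ k, pvLk (ps.foldl (fun ws pw => pvScatter ws pw.1 pw.2) ws) k
      = (ps.foldl (fun d pw => d.insert pw.1 pw.2) d).get? k := by
  induction ps generalizing ws d with
  | nil => exact h
  | cons p t ih =>
    simp only [List.foldl_cons]
    refine ih _ _ (fun q hq => hpos q (List.mem_cons_of_mem _ hq)) (fun k => ?_)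
    rw [pvScatter_lk ws p.1 p.2 (hpos p List.mem_cons_self) k, PySem.Dict.get?_insert]
    split_ifs <;> simp [h k]

theorem pvFilterMap_range_getD {α : Type} (l : List (Option α)) :
    (List.range l.length).filterMap (fun i => l.getD i none) = l.filterMap id := by
  induction l with
  | nil => simp
  | cons a t ih =>
    rw [List.length_cons, List.range_succ_eq_map, List.filterMap_cons, List.filterMap_map]
    cases a with
    | none => simpa [Function.comp_def, List.getD_eq_getElem?_getD] using ih
    | some v => simpa [Function.comp_def, List.getD_eq_getElem?_getD] using ih

theorem pvExtract (ws : List (Option String)) (d : PySem.Dict Int String)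
    (h : ∀ k, pvLk ws k = d.get? k) (hnd : d.keys.Nodup) :
    ws.filterMap id = (PySem.List.sorted d.items (fun kv => kv.1)).map (fun kv => kv.2) := by
  have hitems : d.items.Nodup := List.Nodup.of_map Prod.fst hnd
  set cand : List (Int × String) :=
    (List.range ws.length).filterMap (fun (i : Nat) => (d.get? (i : Int)).map (fun v => ((i : Int), v)))
    with hcand
  have hpw : cand.Pairwise (fun a b => a.1 < b.1) := by
    rw [hcand, List.pairwise_filterMap]
    refine List.pairwise_lt_range.imp ?_
    intro i j hij a ha b hb
    cases hda : d.get? (i : Int) <;> rw [hda] at ha <;> simp at ha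
    cases hdb : d.get? (j : Int) <;> rw [hdb] at hb <;> simp at hb
    rw [← ha, ← hb]; simpa using (by exact_mod_cast hij : (i : Int) < j)
  have hcnd : cand.Nodup := hpw.imp (fun h => by intro he; rw [he] at h; exact lt_irrefl _ h)
  have hmem : ∀ a : Int × String, a ∈ cand ↔ a ∈ d.items := by
    intro ⟨k, v⟩
    rw [← PySem.Dict.get?_eq_some_iff_mem_items d k v hnd, hcand, List.mem_filterMap]
    constructor
    · rintro ⟨i, _, hi⟩
      cases hda : d.get? (i : Int) <;> rw [hda] at hi <;> simp at hi
      rw [← hi.1, hda, hi.2]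
    · intro hkv
      have hlk := h k
      rw [hkv] at hlk
      have hk0 : ¬ k < 0 := by
        intro hneg; rw [pvLk, if_pos hneg] at hlk; simp at hlk
      rw [pvLk, if_neg hk0] at hlk
      have hlt : k.toNat < ws.length := by
        by_contra hge
        rw [List.getD_eq_default _ _ (by omega)] at hlk
        simp at hlk
      refine ⟨k.toNat, List.mem_range.mpr hlt, ?_⟩
      rw [Int.toNat_of_nonneg (by omega), hkv]; rfl
  have hsorted : PySem.List.sorted d.items (fun kv => kv.1) = cand :=
    PySem.List.sorted_eq_of_perm_of_pairwise_lt d.items cand (fun kv => kv.1)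
      ((List.perm_ext_iff_of_nodup hcnd hitems).mpr hmem) hpw
  rw [hsorted, hcand, List.map_filterMap]
  have : ∀ i ∈ List.range ws.length,
      ((d.get? (i : Int)).map (fun v => ((i : Int), v))).map (fun kv => kv.2)
        = ws.getD i none := by
    intro i _
    rw [Option.map_map, ← h (i : Int), pvLk, if_neg (by omega), Int.toNat_natCast]
    cases ws.getD i none <;> rfl
  rw [List.filterMap_congr this, pvFilterMap_range_getD]

-- ===== VERDICT (by name: the statement is the Claim_ definition above) =====
theorem inverted_to_text_spec : Claim_equal_inverted_to_text := by
  intro inverted _ hpre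
  unfold Spec_inverted_to_text inverted_to_text inverted_to_text_alt
  cases inverted with
  | none => rfl
  | some l =>
    by_cases hl : l.isEmpty
    · simp [hl]
    · simp only [if_neg hl]
      obtain ⟨hnd, hpos⟩ := hpre
      have hpairs : ∀ p ∈ pvPairs l, 0 ≤ p.1 := by
        intro p hp
        obtain ⟨wp, hwp, hq⟩ := List.mem_flatMap.mp hp
        obtain ⟨q, hq2, rfl⟩ := List.mem_map.mp hq
        exact hpos wp hwp q hq2
      rw [pvFoldA_pairs, pvFoldB_pairs]
      have hrel := pvInvariant (pvPairs l) [] PySem.Dict.empty hpairs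
        (by intro k; simp [pvLk, PySem.Dict.get?_empty])
      have hnd' := PySem.Dict.nodup_keys_foldl_insert_key (pvPairs l) Prod.fst
        (fun _ pw => pw.2) PySem.Dict.empty (by simp)
      rw [pvExtract _ _ hrel hnd']
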